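-- pv_equiv track=rewrite | github.com/IorenzoLF/Le_Refuge | Le_refuge/arc_agi_refuge/tester_solveur_puzzle_6.py | appliquer_translation
-- ===== SOURCE A (Python) =====
-- def appliquer_translation(grid):
--     """Appliquer une translation des pixels"""
--     rows = len(grid)
--     cols = len(grid[0])
--     solution = [[0 for _ in range(cols)] for _ in range(rows)]
--
--     # Translation vers la droite de 1
--     for i in range(rows):
--         for j in range(cols):
--             if grid[i][j] != 0:
--                 new_j = (j + 1) % cols
--                 solution[i][new_j] = grid[i][j]
--
--     return solution
-- ===== SOURCE B (Python) =====
-- def appliquer_translation(grid):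
--     """Appliquer une translation des pixels"""
--     cols = len(grid[0])  # the grid's width; raises IndexError on an empty grid, like A
--     return [row[cols-1:cols] + row[:cols-1] for row in grid]
-- ===== Notes on version B (the rewrite author's own statement) =====
-- stated objective: simpler
-- what changed: Replaces the nested per-cell loop with its zero-test and modular index arithmetic by rotating the first cols cells of each row as a whole with slicing (row[cols-1:cols] + row[:cols-1]) in a single list comprehension.
-- outside the precondition, e.g. on appliquer_translation([[], [1, 2]]): A returns [[], []], B returns [[], [1]]
import Mathlib
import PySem

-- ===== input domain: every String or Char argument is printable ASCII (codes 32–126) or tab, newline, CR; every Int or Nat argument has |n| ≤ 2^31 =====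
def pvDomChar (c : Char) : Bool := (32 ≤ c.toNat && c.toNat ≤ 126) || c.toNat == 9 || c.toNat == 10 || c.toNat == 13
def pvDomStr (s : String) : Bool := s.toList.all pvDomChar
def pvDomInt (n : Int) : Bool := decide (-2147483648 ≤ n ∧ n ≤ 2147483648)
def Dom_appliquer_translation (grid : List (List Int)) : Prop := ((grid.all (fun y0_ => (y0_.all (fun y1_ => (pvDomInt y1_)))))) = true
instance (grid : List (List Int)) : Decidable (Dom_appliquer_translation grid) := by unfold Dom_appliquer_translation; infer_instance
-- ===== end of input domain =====

-- B replaces A's nested per-cell loop (zero test + modular index arithmetic) by rotating the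
-- first cols cells of each row as a whole with slicing in one comprehension; same exact values.

-- ===== PORT A =====
def appliquer_translation (grid : List (List Int)) : List (List Int) :=
  match PySem.List.pyGet? grid 0 with
  | none => []        -- Python raises IndexError at `len(grid[0])` for grid = []; excluded by Pre_
  | some row0 =>
    let rows : Int := grid.length
    let cols : Int := row0.length
    let solution : List (List Int) :=
      List.replicate grid.length (List.replicate row0.length (0 : Int))
    (PySem.List.pyRange 0 rows 1).foldl (fun sol i =>
      (PySem.List.pyRange 0 cols 1).foldl (fun sol j =>
        let v := PySem.List.pyGetD (PySem.List.pyGetD grid i []) j 0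
        if v ≠ 0 then
          let new_j := PySem.Int.mod (j + 1) cols
          PySem.List.pySetD sol i (PySem.List.pySetD (PySem.List.pyGetD sol i []) new_j v)
        else sol) sol) solution

-- ===== PORT B =====
def appliquer_translation_alt (grid : List (List Int)) : List (List Int) :=
  match PySem.List.pyGet? grid 0 with
  | none => []        -- `cols = len(grid[0])` raises IndexError for grid = []; excluded by Pre_
  | some row0 =>
    let cols : Int := row0.length
    grid.map (fun row =>
      PySem.List.slice row (some (cols - 1)) (some cols) ++
        PySem.List.slice row none (some (cols - 1)))

-- ===== PRECONDITION & SPEC =====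
-- Pre_ excludes the inputs where A raises IndexError ([] and grids with a row shorter than the
-- first row), and the grids whose first row is empty while some other row is not: there A's
-- zero-width scan returns a list of empty rows, an accident of taking len(grid[0]) as the width,
-- while B's negative-index slices keep row[:-1]; no genuine grid has width 0 with non-empty rows.
def Pre_appliquer_translation (grid : List (List Int)) : Prop :=
  grid ≠ [] ∧ (∀ row ∈ grid, (grid.headD []).length ≤ row.length) ∧
    ((grid.headD []).length = 0 → ∀ row ∈ grid, row = [])
instance (grid : List (List Int)) : Decidable (Pre_appliquer_translation grid) := by
  unfold Pre_appliquer_translation; infer_instance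

def pvWitness_appliquer_translation : List (List Int) := [[1, 0, 2], [0, 5, 0]]

def Spec_appliquer_translation (grid : List (List Int)) (out : List (List Int)) : Prop := out = appliquer_translation_alt grid
instance (grid : List (List Int)) (out : List (List Int)) : Decidable (Spec_appliquer_translation grid out) := by unfold Spec_appliquer_translation; infer_instance

-- ===== CLAIM (what is proved, stated in full; the proofs are below) =====
def Claim_equal_appliquer_translation : Prop := ∀ (grid : List (List Int)), Dom_appliquer_translation grid → Pre_appliquer_translation grid → Spec_appliquer_translation grid (appliquer_translation grid)

-- ===== LEMMAS AND PROOFS =====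

-- row-level accumulator step of A's inner loop, with the column count c fixed
def pvRowStep (row : List Int) (c : Nat) (r : List Int) (k : Nat) : List Int :=
  let v := PySem.List.pyGetD row (k : Int) 0
  if v ≠ 0 then PySem.List.pySetD r (PySem.Int.mod ((k : Int) + 1) (c : Int)) v else r

-- B's per-row value: the first c cells rotated right by one (as drop/take normal forms)
def pvRot (c : Nat) (row : List Int) : List Int :=
  (row.drop (c - 1)).take 1 ++ row.take (c - 1)

lemma pv_pyGetD_nat (row : List Int) (m : Nat) (hm : m < row.length) :
    PySem.List.pyGetD row (m : Int) 0 = row[m] := by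
  simp [PySem.List.pyGetD_natCast, List.getD_eq_getElem?_getD, hm]

lemma pv_pyGetD_nat' (g : List (List Int)) (m : Nat) (hm : m < g.length) :
    PySem.List.pyGetD g (m : Int) [] = g[m] := by
  simp [PySem.List.pyGetD_natCast, List.getD_eq_getElem?_getD, hm]

-- the inner j-loop only rewrites row i of the accumulator
lemma pv_inner_eq_set (row : List Int) (c : Nat) (i : Nat) :
    ∀ (js : List Nat) (sol : List (List Int)) (hi : i < sol.length),
      js.foldl (fun sol (k : Nat) =>
          let v := PySem.List.pyGetD row (k : Int) 0
          if v ≠ 0 then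
            PySem.List.pySetD sol (i : Int)
              (PySem.List.pySetD (PySem.List.pyGetD sol (i : Int) [])
                (PySem.Int.mod ((k : Int) + 1) (c : Int)) v)
          else sol) sol
        = sol.set i (js.foldl (pvRowStep row c) (sol[i]'hi)) := by
  intro js
  induction js with
  | nil => intro sol hi; simp
  | cons k js ih =>
    intro sol hi
    simp only [List.foldl_cons]
    by_cases h0 : PySem.List.pyGetD row (k : Int) 0 = 0
    · rw [if_neg (by simpa using h0)]
      rw [ih sol hi]
      congr 1
      unfold pvRowStep
      rw [if_neg (by simpa using h0)]
    · rw [if_pos (by simpa using h0)]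
      rw [pv_pyGetD_nat' sol i hi, PySem.List.pySetD_natCast]
      have hlen : i < (sol.set i (PySem.List.pySetD sol[i] (PySem.Int.mod ((k:Int)+1) (c:Int)) (PySem.List.pyGetD row (k:Int) 0))).length := by
        simpa using hi
      rw [ih _ hlen]
      rw [List.set_set, List.getElem_set_self]
      congr 2
      unfold pvRowStep
      rw [if_pos (by simpa using h0)]

lemma pv_row_inv (row : List Int) (c : Nat) (hr : c ≤ row.length) (hc : 0 < c) :
    ∀ m, m ≤ c - 1 →
      (List.range m).foldl (pvRowStep row c) (List.replicate c 0) =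
        0 :: (row.take m ++ List.replicate (c - 1 - m) 0) := by
  intro m
  induction m with
  | zero =>
    intro _
    have : c = (c - 1) + 1 := by omega
    rw [List.range_zero, List.foldl_nil, this]
    simp [List.replicate_succ]
  | succ m ih =>
    intro hm
    rw [List.range_succ, List.foldl_append, ih (by omega), List.foldl_cons, List.foldl_nil]
    have hmlen : m < row.length := by omega
    have hv := pv_pyGetD_nat row m hmlen
    have hmod : PySem.Int.mod ((m : Int) + 1) (c : Int) = ((m + 1 : Nat) : Int) := by
      have := PySem.Int.mod_natCast (m + 1) c
      rw [Nat.mod_eq_of_lt (by omega)] at this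
      push_cast at this ⊢
      exact this
    have hrep : List.replicate (c - 1 - m) (0 : Int) = 0 :: List.replicate (c - 1 - (m + 1)) 0 := by
      have h : c - 1 - m = (c - 1 - (m + 1)) + 1 := by omega
      rw [h, List.replicate_succ]
    have htake : row.take (m + 1) = row.take m ++ [row[m]] := List.take_succ_eq_append_getElem hmlen
    have hlen : (row.take m).length = m := by simp [List.length_take]; omega
    unfold pvRowStep
    simp only [hv]
    by_cases h0 : row[m] = 0
    · rw [if_neg (by simpa using h0)]
      rw [hrep, htake, h0]
      simp
    · rw [if_pos (by simpa using h0), hmod, PySem.List.pySetD_natCast]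
      rw [hrep, htake, List.set_cons_succ]
      congr 1
      rw [List.set_append]
      simp only [hlen, lt_irrefl, if_false, Nat.sub_self, List.set_cons_zero,
        List.append_assoc, List.cons_append, List.nil_append]

lemma pv_row_final (row : List Int) (c : Nat) (hr : c ≤ row.length) (hc : 0 < c) :
    (List.range c).foldl (pvRowStep row c) (List.replicate c 0) =
      row[c-1]'(by omega) :: row.take (c - 1) := by
  have hsplit : List.range c = List.range (c-1) ++ [c-1] := by
    conv_lhs => rw [show c = (c - 1) + 1 by omega]
    rw [List.range_succ]
  rw [hsplit, List.foldl_append,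
    pv_row_inv row c hr hc (c-1) (le_refl _), List.foldl_cons, List.foldl_nil]
  have hlast : (c - 1) < row.length := by omega
  have hv := pv_pyGetD_nat row (c-1) hlast
  have hmod : PySem.Int.mod (((c-1 : Nat) : Int) + 1) (c : Int) = (0 : Int) := by
    have h1 : ((c - 1 : Nat) : Int) + 1 = ((c : Nat) : Int) := by omega
    rw [h1]
    simp
  unfold pvRowStep
  simp only [hv]
  by_cases h0 : row[c-1] = 0
  · rw [if_neg (by simpa using h0), h0]; simp
  · rw [if_pos (by simpa using h0), hmod]
    have h00 : (0 : Int) = ((0 : Nat) : Int) := rfl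
    rw [h00, PySem.List.pySetD_natCast]
    simp

lemma pv_rot_eq (row : List Int) (c : Nat) (hr : c ≤ row.length) (hc : 0 < c) :
    pvRot c row = row[c-1]'(by omega) :: row.take (c - 1) := by
  unfold pvRot
  have h : c - 1 < row.length := by omega
  rw [List.drop_eq_getElem_cons h]
  rfl

-- outer loop invariant: after the first m rows, the accumulator is rotated-prefix ++ zero rows
lemma pv_outer_inv (grid : List (List Int)) (c : Nat) (hc : 0 < c)
    (hrect : ∀ row ∈ grid, c ≤ row.length) :
    ∀ m, m ≤ grid.length →
      (List.range m).foldl (fun sol (i : Nat) =>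
          (List.range c).foldl (fun sol (k : Nat) =>
            let v := PySem.List.pyGetD (PySem.List.pyGetD grid (i : Int) []) (k : Int) 0
            if v ≠ 0 then
              PySem.List.pySetD sol (i : Int)
                (PySem.List.pySetD (PySem.List.pyGetD sol (i : Int) [])
                  (PySem.Int.mod ((k : Int) + 1) (c : Int)) v)
            else sol) sol)
        (List.replicate grid.length (List.replicate c 0))
      = (grid.take m).map (pvRot c) ++ List.replicate (grid.length - m) (List.replicate c 0) := by
  intro m
  induction m with
  | zero => simp
  | succ m ih =>
    intro hm
    rw [List.range_succ, List.foldl_append, ih (by omega), List.foldl_cons, List.foldl_nil]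
    have hmg : m < grid.length := by omega
    have hlenpre : ((grid.take m).map (pvRot c)).length = m := by
      simp only [List.length_map, List.length_take]; omega
    have hilen : m < ((grid.take m).map (pvRot c) ++ List.replicate (grid.length - m) (List.replicate c 0)).length := by
      simp; omega
    rw [pv_inner_eq_set (PySem.List.pyGetD grid (m : Int) []) c m (List.range c) _ hilen]
    have hget : ((grid.take m).map (pvRot c) ++ List.replicate (grid.length - m) (List.replicate c 0))[m]'hilen = List.replicate c (0:Int) := by
      rw [List.getElem_append_right (by omega)]
      simp only [hlenpre, List.getElem_replicate]
    rw [hget, pv_pyGetD_nat' grid m hmg,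
      pv_row_final (grid[m]) c (hrect _ (List.getElem_mem hmg)) hc,
      ← pv_rot_eq (grid[m]) c (hrect _ (List.getElem_mem hmg)) hc]
    have hrep : List.replicate (grid.length - m) (List.replicate c (0:Int)) =
        List.replicate c (0:Int) :: List.replicate (grid.length - (m+1)) (List.replicate c 0) := by
      rw [show grid.length - m = (grid.length - (m+1)) + 1 by omega, List.replicate_succ]
    have htake : grid.take (m+1) = grid.take m ++ [grid[m]] := List.take_succ_eq_append_getElem hmg
    rw [hrep, htake, List.set_append, if_neg (by rw [hlenpre]; omega)]
    simp only [hlenpre]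
    rw [Nat.sub_self, List.set_cons_zero]
    rw [List.map_append]
    simp [List.map_take]

lemma pv_pyGet?_cons {α : Type} (x : α) (xs : List α) :
    PySem.List.pyGet? (x :: xs) (0 : Int) = some x := by simp [pysem]

-- B's per-row slices compute pvRot when the width is positive and ≤ the row's length
lemma pv_slices_eq_rot (row : List Int) (c : Nat) (hc : 0 < c) :
    PySem.List.slice row (some ((c : Int) - 1)) (some (c : Int)) ++
      PySem.List.slice row none (some ((c : Int) - 1)) = pvRot c row := by
  have h1 : ((c : Int) - 1) = ((c - 1 : Nat) : Int) := by omega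
  rw [h1, PySem.List.slice_to_natCast, pvRot]
  congr 1
  have := PySem.List.slice_natCast (xs := row) (a := c - 1) (b := c)
  rw [this, show c - (c - 1) = 1 by omega]

theorem appliquer_translation_spec : Claim_equal_appliquer_translation := by
  unfold Claim_equal_appliquer_translation
  intro grid _ hpre
  obtain ⟨hne, hrect, hzero⟩ := hpre
  unfold Spec_appliquer_translation
  cases grid with
  | nil => exact absurd rfl hne
  | cons r0 rest =>
    have hrect' : ∀ row ∈ r0 :: rest, r0.length ≤ row.length := by simpa using hrect
    simp only [appliquer_translation, appliquer_translation_alt, pv_pyGet?_cons]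
    -- convert both pyRange folds to List.range folds over Nat
    rw [PySem.List.pyRange_zero_nat ((r0 :: rest).length), List.foldl_map]
    have hinner : ∀ (sol : List (List Int)) (i : Nat),
        (PySem.List.pyRange 0 (r0.length : Int) 1).foldl (fun sol (j : Int) =>
          let v := PySem.List.pyGetD (PySem.List.pyGetD (r0 :: rest) (i : Int) []) j 0
          if v ≠ 0 then
            PySem.List.pySetD sol (i : Int)
              (PySem.List.pySetD (PySem.List.pyGetD sol (i : Int) [])
                (PySem.Int.mod (j + 1) (r0.length : Int)) v)
          else sol) sol
        = (List.range r0.length).foldl (fun sol (k : Nat) =>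
            let v := PySem.List.pyGetD (PySem.List.pyGetD (r0 :: rest) (i : Int) []) (k : Int) 0
            if v ≠ 0 then
              PySem.List.pySetD sol (i : Int)
                (PySem.List.pySetD (PySem.List.pyGetD sol (i : Int) [])
                  (PySem.Int.mod ((k : Int) + 1) (r0.length : Int)) v)
            else sol) sol := by
      intro sol i
      rw [PySem.List.pyRange_zero_nat r0.length, List.foldl_map]
    simp only [hinner]
    by_cases hc : 0 < r0.length
    · rw [pv_outer_inv (r0 :: rest) r0.length hc hrect' ((r0 :: rest).length) (le_refl _)]
      simp only [List.take_length, Nat.sub_self, List.replicate_zero, List.append_nil]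
      exact List.map_congr_left (fun row _ => (pv_slices_eq_rot row r0.length hc).symm)
    · -- cols = 0: every row is [], both sides are the list of empty rows
      have hc0 : r0.length = 0 := by omega
      have hrows : ∀ row ∈ r0 :: rest, row = ([] : List Int) := by
        simpa [hc0] using hzero
      rw [hc0]
      simp only [List.range_zero, List.foldl_nil, List.foldl_fixed, Nat.cast_zero]
      rw [List.map_congr_left (l := r0 :: rest)
        (g := fun _ => ([] : List Int)) (fun row h => by rw [hrows row h]; rfl), List.map_const']
      simp
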